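-- pv_equiv track=rewrite | github.com/Griffins2005/cs1110 | a4_files_v3/utilities.py | backbone
-- ===== SOURCE A (Python) =====
-- def backbone(pretty_json_conv_tree, char_cutoff):
--     """
--     Return a string giving an overview of the structure of pretty_json_conv_tree.
--
--     The returned string is comprised of every line in pretty_json_conv_tree
--     that starts with any amount of whitespace followed by any of the following
--     strings (excluding the enclosing single quotes).
--         '"name":'
--         '"selftext":'
--         '"author":'
--         '"parent_id":'
--         '"body":'
--     Further, each line in the returned string is abridged: the first 12
--     characters (which will be just whitespace) of the original line are
--     omitted, and after that as many characters as possible are included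
--     up to a limit `char_cutoff`.
--     The returned lines are ordered as they were in pretty_json_conv_tree.
--     A single newline ('\n') character separates each of the returned lines.
--
--     The very first set of three such lines represents the original post, and
--     is followed by a "divider bar" consisting of `char_cutoff` hyphens in the
--     returned string.
--
--     :param str pretty_json_conv_tree: Reddit conversation-tree JSON that has
--      been passed through json_to_pretty.
--
--     :param int char_cutoff:  how many characters to include for each line
--
--     Example for char_cutoff 80, JSON for CMV submission 2rpvc7:
--
--     The actual return string:
--     '"author": "The_Aesir9613",\n"name": "t3_2rpvc7",\n"selftext": "\\n\\n_____\\nIt\'s my opinion that bench clearings in baseball hurts t\n--------------------------------------------------------------------------------\n"author": "Kman17",\n"body": "I\'d be a little bit cautious of removing the self-policing elements out\n"name": "t1_cnibo8i",\n"parent_id": "t3_2rpvc7",\n          "author": "The_Aesir9613",\n          "body": "Good points.  I would argue though that Hockey fights aren\'t \n          "name": "t1_cnikfa7",\n          "parent_id": "t1_cnibo8i",\n"author": "CherrySlurpee",\n"body": "They really actually help the sport.\\n\\nBaseball, to most people, is a \n"name": "t1_cni6vol",\n"parent_id": "t3_2rpvc7",\n          "author": "The_Aesir9613",\n          "body": "They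 can be exciting, yes, but that only means people enjoyed\n          "name": "t1_cni7f98",\n          "parent_id": "t1_cni6vol",\n                    "author": "SOLUNAR",\n                    "body": "&gt; That doesn\'t mean they enjoyed watching baseba\n                    "name": "t1_cniszwq",\n                    "parent_id": "t1_cni7f98",\n                              "author": "The_Aesir9613",\n                              "body": "It\'s not a legitimate argument to say bas\n                              "name": "t1_cnjaebu",\n                              "parent_id": "t1_cniszwq",\n"author": "MageZero",\n"body": " Major League Baseball has not only survived, but flourished for 145 ye\n"name": "t1_cni5tm6",\n"parent_id": "t3_2rpvc7",'
--
--     How that string looks when printed: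
-- "author": "The_Aesir9613",
-- "name": "t3_2rpvc7",
-- "selftext": "\n\n_____\nIt's my opinion that bench clearings in baseball hurts t
-- --------------------------------------------------------------------------------
-- "author": "Kman17",
-- "body": "I'd be a little bit cautious of removing the self-policing elements out
-- "name": "t1_cnibo8i",
-- "parent_id": "t3_2rpvc7",
--           "author": "The_Aesir9613",
--           "body": "Good points.  I would argue though that Hockey fights aren't
--           "name": "t1_cnikfa7",
--           "parent_id": "t1_cnibo8i",
-- "author": "CherrySlurpee",
-- "body": "They really actually help the sport.\n\nBaseball, to most people, is a
-- "name": "t1_cni6vol",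
-- "parent_id": "t3_2rpvc7",
--           "author": "The_Aesir9613",
--           "body": "They can be exciting, yes, but that only means people enjoyed
--           "name": "t1_cni7f98",
--           "parent_id": "t1_cni6vol",
--                     "author": "SOLUNAR",
--                     "body": "&gt; That doesn't mean they enjoyed watching baseba
--                     "name": "t1_cniszwq",
--                     "parent_id": "t1_cni7f98",
--                               "author": "The_Aesir9613",
--                               "body": "It's not a legitimate argument to say bas
--                               "name": "t1_cnjaebu",
--                               "parent_id": "t1_cniszwq",
-- "author": "MageZero",
-- "body": " Major League Baseball has not only survived, but flourished for 145 ye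
-- "name": "t1_cni5tm6",
-- "parent_id": "t3_2rpvc7",
--     """
--
--     # Stop execution if given unexpected argument type, printing the
--     # given error message.
--     assert isinstance(pretty_json_conv_tree, str), \
--         f"backbone: wrong arg type {type(pretty_json_conv_tree)}"
--
--     # STUDENTS: keep the `jlines=...` line in.
--     # It is a list of the lines in pretty_json_conv_tree.
--     # You may want to temporarily print its first few lines to see what it
--     # looks like; but remove those print statements before submitting.
--     jlines = pretty_json_conv_tree.split('\n')
--
--     result_lines = []
--     keys_to_keep = ['"name":', '"selftext":', '"author":', '"parent_id":', '"body":']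
--     post_lines_count = 0
--
--     for line in jlines:
--         stripped = line.lstrip()
--         matched_key = None
--
--         for key in keys_to_keep:
--             if stripped.startswith(key) and matched_key is None:
--                 matched_key = key
--                 trimmed_line = line[12:][:char_cutoff]
--                 result_lines.append(trimmed_line)
--                 post_lines_count += 1
--
--         if matched_key and post_lines_count == 3:
--             result_lines.append('-' * char_cutoff)
--             post_lines_count += 1
--
--     return '\n'.join(result_lines)
-- ===== SOURCE B (Python) =====
-- def backbone(pretty_json_conv_tree, char_cutoff):
--     assert isinstance(pretty_json_conv_tree, str), \
--         f"backbone: wrong arg type {type(pretty_json_conv_tree)}"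
--     lines = pretty_json_conv_tree.split('\n')
--     # One scan per key: record (original line number, abridged line) for every
--     # line introduced by that key.  No key is a prefix of another, so each line
--     # is recorded at most once across all five scans.
--     hits = []
--     for key in ('"name":', '"selftext":', '"author":', '"parent_id":', '"body":'):
--         for i, line in enumerate(lines):
--             if line.lstrip().startswith(key):
--                 hits.append((i, line[12:][:char_cutoff]))
--     # Restore the original order by sorting on the line number.
--     hits.sort(key=lambda t: t[0])
--     picked = [abridged for _, abridged in hits]
--     # The divider bar goes right after the first three kept lines.
--     if len(picked) >= 3:
--         picked = picked[:3] + ['-' * char_cutoff] + picked[3:]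
--     return '\n'.join(picked)
-- ===== Notes on version B (the rewrite author's own statement) =====
-- stated objective: alternative
-- what changed: Replaces A's counter-driven single pass (inner key loop with a matched flag and a running count that fires the divider mid-loop) by five independent per-key scans that collect (line number, abridged line) pairs, a sort on line number to restore the original order (valid because no key is a prefix of another, so the line numbers are distinct), and positional insertion of the divider after the third element.
import Mathlib
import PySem

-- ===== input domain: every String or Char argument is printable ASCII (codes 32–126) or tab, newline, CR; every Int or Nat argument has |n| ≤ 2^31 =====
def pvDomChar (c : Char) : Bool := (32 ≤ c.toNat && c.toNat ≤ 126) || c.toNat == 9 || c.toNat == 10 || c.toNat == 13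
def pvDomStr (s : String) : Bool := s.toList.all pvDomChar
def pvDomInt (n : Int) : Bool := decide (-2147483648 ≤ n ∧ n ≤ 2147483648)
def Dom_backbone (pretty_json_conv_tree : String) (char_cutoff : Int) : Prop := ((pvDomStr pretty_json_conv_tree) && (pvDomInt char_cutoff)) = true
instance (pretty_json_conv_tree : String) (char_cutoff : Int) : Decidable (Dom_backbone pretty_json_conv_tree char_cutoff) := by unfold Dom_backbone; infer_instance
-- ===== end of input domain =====

-- B replaces A's counter-driven single pass by five per-key scans collecting (line number, abridged line) pairs, a sort on line number, and positional divider insertion (objective: alternative).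


-- shared literals of the task (both Pythons spell them out identically); lines are kept as
-- List Char via PySem.Chars (the exact list-level definitions behind PySem.Str)
def bbKeys : List (List Char) := ["\"name\":".toList, "\"selftext\":".toList, "\"author\":".toList, "\"parent_id\":".toList, "\"body\":".toList]
-- line[12:][:char_cutoff]
def bbTrim (char_cutoff : Int) (line : List Char) : List Char :=
  PySem.Chars.slice (PySem.Chars.slice line (some 12) none) none (some char_cutoff)
-- '-' * char_cutoff  (hand port: Python string repetition; exact since a non-positive count gives '' and toNat clamps to 0)
def bbDivider (char_cutoff : Int) : List Char := List.replicate char_cutoff.toNat '-'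

-- ===== PORT A =====
-- the body of A's `for line in jlines` loop: inner `for key in keys_to_keep` fold over
-- (matched_key, result_lines, post_lines_count), then the divider check
def aStep (char_cutoff : Int) (st : List (List Char) × Int) (line : List Char) : List (List Char) × Int :=
  let stripped := PySem.Chars.lstrip line
  let inner := bbKeys.foldl
    (fun (st2 : Option (List Char) × List (List Char) × Int) key =>
      if PySem.Chars.startswith stripped key && st2.1.isNone then
        (some key, st2.2.1 ++ [bbTrim char_cutoff line], st2.2.2 + 1)
      else st2)
    (none, st.1, st.2)
  -- `if matched_key and post_lines_count == 3`: every key is a nonempty string, so truthiness of matched_key is isSome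
  if inner.1.isSome && inner.2.2 == 3 then (inner.2.1 ++ [bbDivider char_cutoff], inner.2.2 + 1)
  else (inner.2.1, inner.2.2)

def backbone (pretty_json_conv_tree : String) (char_cutoff : Int) : String :=
  let jlines := PySem.Chars.splitOn pretty_json_conv_tree.toList "\n".toList
  let fin := jlines.foldl (aStep char_cutoff) ([], 0)
  String.ofList (PySem.Chars.join "\n".toList fin.1)

-- ===== PORT B =====
def backbone_alt (pretty_json_conv_tree : String) (char_cutoff : Int) : String :=
  let lines := PySem.Chars.splitOn pretty_json_conv_tree.toList "\n".toList
  -- one scan per key: `for i, line in enumerate(lines): if …: hits.append((i, line[12:][:char_cutoff]))`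
  let hits := bbKeys.foldl
    (fun (acc : List (Int × List Char)) key =>
      (PySem.List.enumerate lines 0).foldl
        (fun acc2 p =>
          if PySem.Chars.startswith (PySem.Chars.lstrip p.2) key then acc2 ++ [(p.1, bbTrim char_cutoff p.2)]
          else acc2)
        acc)
    []
  -- hits.sort(key=lambda t: t[0])
  let hits := PySem.List.sorted hits (fun t => t.1) false
  let picked := hits.map (fun t => t.2)
  -- picked[:3] + ['-'*char_cutoff] + picked[3:] with the nonnegative literal bound 3: take/drop
  let picked := if 3 ≤ picked.length then picked.take 3 ++ [bbDivider char_cutoff] ++ picked.drop 3 else picked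
  String.ofList (PySem.Chars.join "\n".toList picked)

-- ===== PRECONDITION & SPEC =====
def Spec_backbone (pretty_json_conv_tree : String) (char_cutoff : Int) (out : String) : Prop := out = backbone_alt pretty_json_conv_tree char_cutoff
instance (pretty_json_conv_tree : String) (char_cutoff : Int) (out : String) : Decidable (Spec_backbone pretty_json_conv_tree char_cutoff out) := by unfold Spec_backbone; infer_instance

-- ===== CLAIM (what is proved, stated in full; the proofs are below) =====
def Claim_equal_backbone : Prop := ∀ (pretty_json_conv_tree : String) (char_cutoff : Int), Dom_backbone pretty_json_conv_tree char_cutoff → Spec_backbone pretty_json_conv_tree char_cutoff (backbone pretty_json_conv_tree char_cutoff)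

-- ===== LEMMAS AND PROOFS =====

-- B's match predicate on a pair from enumerate
def bbMatch (line : List Char) : Bool :=
  bbKeys.any (fun k => PySem.Chars.startswith (PySem.Chars.lstrip line) k)

-- canonical state of A's loop when the matched abridged lines so far are `ms`
def bbIns3 (c : Int) (ms : List (List Char)) : List (List Char) :=
  if 3 ≤ ms.length then ms.take 3 ++ [bbDivider c] ++ ms.drop 3 else ms
def bbCnt3 (ms : List (List Char)) : Int :=
  if 3 ≤ ms.length then (ms.length : Int) + 1 else (ms.length : Int)

-- the inner key fold ignores everything once matched_key is set
theorem innerFold_some (p : List Char → Bool) (app : List Char) (keys : List (List Char))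
    (k : List Char) (rl : List (List Char)) (cnt : Int) :
    keys.foldl
      (fun (st2 : Option (List Char) × List (List Char) × Int) key =>
        if p key && st2.1.isNone then (some key, st2.2.1 ++ [app], st2.2.2 + 1) else st2)
      (some k, rl, cnt) = (some k, rl, cnt) := by
  induction keys with
  | nil => rfl
  | cons key ks ih =>
      rw [List.foldl_cons, if_neg (by simp)]
      exact ih

-- the inner key fold appends `app` exactly once iff some key matches
theorem innerFold_none (p : List Char → Bool) (app : List Char) (keys : List (List Char))
    (rl : List (List Char)) (cnt : Int) :
    (keys.foldl
      (fun (st2 : Option (List Char) × List (List Char) × Int) key =>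
        if p key && st2.1.isNone then (some key, st2.2.1 ++ [app], st2.2.2 + 1) else st2)
      (none, rl, cnt)).2 = (if keys.any p then (rl ++ [app], cnt + 1) else (rl, cnt))
    ∧ (keys.foldl
      (fun (st2 : Option (List Char) × List (List Char) × Int) key =>
        if p key && st2.1.isNone then (some key, st2.2.1 ++ [app], st2.2.2 + 1) else st2)
      (none, rl, cnt)).1.isSome = keys.any p := by
  induction keys with
  | nil => simp
  | cons key ks ih =>
      by_cases hk : p key
      · rw [List.foldl_cons, if_pos (by simp [hk]), innerFold_some]
        simp [hk]
      · rw [List.foldl_cons, if_neg (by simp [hk])]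
        rcases ih with ⟨ih1, ih2⟩
        rw [ih1, ih2]
        simp [hk]

-- one iteration of A's outer loop, characterised (the appended value does not depend on
-- which key matched)
theorem aStep_eval (c : Int) (rl : List (List Char)) (cnt : Int) (line : List Char) :
    aStep c (rl, cnt) line =
      if bbMatch line then
        (if cnt + 1 == 3 then (rl ++ [bbTrim c line] ++ [bbDivider c], cnt + 2)
         else (rl ++ [bbTrim c line], cnt + 1))
      else (rl, cnt) := by
  unfold aStep
  dsimp only
  have h := innerFold_none (fun k => PySem.Chars.startswith (PySem.Chars.lstrip line) k)
    (bbTrim c line) bbKeys rl cnt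
  rcases h with ⟨h2, h1⟩
  rw [show (bbMatch line) = bbKeys.any (fun k => PySem.Chars.startswith (PySem.Chars.lstrip line) k) from rfl]
  rw [h1, h2]
  by_cases hm : bbKeys.any (fun k => PySem.Chars.startswith (PySem.Chars.lstrip line) k)
  · simp only [hm, if_true, Bool.true_and]
    by_cases h3 : cnt + 1 == 3 <;> simp [h3] <;> omega
  · simp [hm]

-- A's step preserves the canonical form
theorem aStep_canon (c : Int) (ms : List (List Char)) (line : List Char) :
    aStep c (bbIns3 c ms, bbCnt3 ms) line =
      (bbIns3 c (ms ++ if bbMatch line then [bbTrim c line] else []),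
       bbCnt3 (ms ++ if bbMatch line then [bbTrim c line] else [])) := by
  rw [aStep_eval]
  by_cases hm : bbMatch line
  · simp only [hm, if_true]
    match ms with
    | [] => simp [bbIns3, bbCnt3]
    | [a] => simp [bbIns3, bbCnt3]
    | [a, b] => simp [bbIns3, bbCnt3]
    | a :: b :: d :: rest =>
        have hlen : ¬ ((rest.length : Int) + 1 + 1 + 1 + 1 + 1 = 3) := by omega
        have h3 : (3:Nat) ≤ (a :: b :: d :: rest).length := by simp
        simp [bbIns3, bbCnt3, hlen, List.take_append_of_le_length, List.drop_append_of_le_length]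
  · simp [hm]

-- loop invariant: folding A's step from a canonical state stays canonical
theorem aFold_canon (c : Int) (lines : List (List Char)) (ms : List (List Char)) :
    lines.foldl (aStep c) (bbIns3 c ms, bbCnt3 ms) =
      (bbIns3 c (ms ++ (lines.filter bbMatch).map (bbTrim c)),
       bbCnt3 (ms ++ (lines.filter bbMatch).map (bbTrim c))) := by
  induction lines generalizing ms with
  | nil => simp
  | cons line rest ih =>
      rw [List.foldl_cons, aStep_canon]
      by_cases hm : bbMatch line
      · simp only [hm, if_true]
        rw [ih (ms ++ [bbTrim c line])]
        simp [hm]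
      · simp only [hm, Bool.false_eq_true, if_false, List.append_nil]
        rw [ih ms]
        simp [hm]

-- ===== B-side lemmas =====

-- no key of the task is a prefix of another, so a line matches at most one key
theorem bb_mutex (s : List Char) (k1 k2 : List Char) (h1 : k1 ∈ bbKeys) (h2 : k2 ∈ bbKeys)
    (m1 : PySem.Chars.startswith s k1 = true) (m2 : PySem.Chars.startswith s k2 = true) :
    k1 = k2 := by
  have p1 : k1 <+: s := (PySem.Chars.startswith_iff s k1).mp m1
  have p2 : k2 <+: s := (PySem.Chars.startswith_iff s k2).mp m2
  have hor := List.prefix_or_prefix_of_prefix p1 p2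
  have hkeys : ∀ a ∈ bbKeys, ∀ b ∈ bbKeys, (a <+: b ∨ b <+: a) → a = b := by decide
  exact hkeys k1 h1 k2 h2 hor

def bbQ (k : List Char) (p : Int × List Char) : Bool :=
  PySem.Chars.startswith (PySem.Chars.lstrip p.2) k

-- the concatenation of the five per-key filtered scans is a permutation of the
-- single any-key filtered scan (each element passes at most one key's filter)
theorem bb_flatMap_perm (f : Int × List Char → Int × List Char) :
    ∀ es : List (Int × List Char),
      (bbKeys.flatMap (fun k => (es.filter (fun p => bbQ k p)).map f)).Perm
        ((es.filter (fun p => bbKeys.any (fun k => bbQ k p))).map f) := by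
  intro es
  induction es with
  | nil => simp
  | cons p t ih =>
      by_cases hm : bbKeys.any (fun k => bbQ k p)
      · obtain ⟨k0, hk0, hq0⟩ := List.any_eq_true.mp hm
        obtain ⟨l1, l2, hsplit⟩ := List.append_of_mem hk0
        have hnd : bbKeys.Nodup := by decide
        rw [hsplit] at hnd
        have hnotin : k0 ∉ l1 ∧ k0 ∉ l2 := by
          rw [List.nodup_append] at hnd
          exact ⟨fun h => hnd.2.2 k0 h k0 (by simp) rfl, (List.nodup_cons.mp hnd.2.1).1⟩
        have hfalse : ∀ k, k ∈ l1 ∨ k ∈ l2 → bbQ k p = false := by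
          intro k hk
          by_contra hcon
          have hq : bbQ k p = true := by
            cases h' : bbQ k p
            · exact absurd h' hcon
            · rfl
          have hkmem : k ∈ bbKeys := by
            rw [hsplit]
            rcases hk with h | h
            · exact List.mem_append_left _ h
            · exact List.mem_append_right _ (List.mem_cons_of_mem _ h)
          have := bb_mutex (PySem.Chars.lstrip p.2) k k0 hkmem hk0 hq hq0
          subst this
          rcases hk with h | h
          · exact hnotin.1 h
          · exact hnotin.2 h
        have hcongr1 : ∀ l : List (List Char), (∀ k ∈ l, bbQ k p = false) →
            l.flatMap (fun k => ((p :: t).filter (fun q => bbQ k q)).map f) =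
            l.flatMap (fun k => (t.filter (fun q => bbQ k q)).map f) := by
          intro l hl
          apply List.flatMap_congr
          intro k hk
          rw [List.filter_cons, if_neg (by simp [hl k hk])]
        have hL : bbKeys.flatMap (fun k => ((p :: t).filter (fun q => bbQ k q)).map f) =
            l1.flatMap (fun k => (t.filter (fun q => bbQ k q)).map f) ++
              ((f p :: (t.filter (fun q => bbQ k0 q)).map f) ++
               l2.flatMap (fun k => (t.filter (fun q => bbQ k q)).map f)) := by
          rw [hsplit, List.flatMap_append, List.flatMap_cons,
              hcongr1 l1 (fun k hk => hfalse k (Or.inl hk)),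
              hcongr1 l2 (fun k hk => hfalse k (Or.inr hk)),
              List.filter_cons, if_pos (by simp [hq0]), List.map_cons]
        have hT : bbKeys.flatMap (fun k => (t.filter (fun q => bbQ k q)).map f) =
            l1.flatMap (fun k => (t.filter (fun q => bbQ k q)).map f) ++
              ((t.filter (fun q => bbQ k0 q)).map f ++
               l2.flatMap (fun k => (t.filter (fun q => bbQ k q)).map f)) := by
          rw [hsplit, List.flatMap_append, List.flatMap_cons]
        rw [hL, List.filter_cons, if_pos (by simp [hm]), List.map_cons]
        refine List.Perm.trans ?_ (List.Perm.cons (f p) (hT ▸ ih))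
        simpa only [List.cons_append] using
          (List.perm_middle (a := f p)
            (l₁ := l1.flatMap (fun k => (t.filter (fun q => bbQ k q)).map f))
            (l₂ := (t.filter (fun q => bbQ k0 q)).map f ++
               l2.flatMap (fun k => (t.filter (fun q => bbQ k q)).map f)))
      · have hfalse : ∀ k ∈ bbKeys, bbQ k p = false := by
          intro k hk
          cases h' : bbQ k p
          · rfl
          · exact absurd (List.any_eq_true.mpr ⟨k, hk, h'⟩) hm
        have hcongr : bbKeys.flatMap (fun k => ((p :: t).filter (fun q => bbQ k q)).map f) =
            bbKeys.flatMap (fun k => (t.filter (fun q => bbQ k q)).map f) := by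
          apply List.flatMap_congr
          intro k hk
          rw [List.filter_cons, if_neg (by simp [hfalse k hk])]
        rw [hcongr, List.filter_cons, if_neg (by simp [hm])]
        exact ih

-- the enumerate-filter-map collapses to the plain filter-map once indices are dropped
theorem bb_enum_proj (c : Int) (lines : List (List Char)) : ∀ s : Int,
    ((PySem.List.enumerate lines s).filter (fun p => bbKeys.any (fun k => bbQ k p))).map
        (fun p => (bbTrim c p.2)) =
      (lines.filter bbMatch).map (bbTrim c) := by
  induction lines with
  | nil => intro s; simp [PySem.List.enumerate_nil]
  | cons l t ih =>
      intro s
      rw [PySem.List.enumerate_cons, List.filter_cons, List.filter_cons]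
      by_cases hm : bbMatch l
      · rw [if_pos (by simpa [bbQ, bbMatch] using hm), if_pos (by simpa [bbMatch] using hm),
            List.map_cons, List.map_cons, ih (s + 1)]
      · rw [if_neg (by simpa [bbQ, bbMatch] using hm), if_neg (by simpa [bbMatch] using hm),
            ih (s + 1)]

-- B's sorted hit list is exactly the in-order any-key scan
theorem bb_sorted_hits (c : Int) (lines : List (List Char)) :
    PySem.List.sorted
        (bbKeys.flatMap (fun k =>
          ((PySem.List.enumerate lines 0).filter (fun p => bbQ k p)).map
            (fun p => (p.1, bbTrim c p.2))))
        (fun t => t.1) false =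
      ((PySem.List.enumerate lines 0).filter (fun p => bbKeys.any (fun k => bbQ k p))).map
        (fun p => (p.1, bbTrim c p.2)) := by
  apply PySem.List.sorted_eq_of_perm_of_pairwise_lt
  · exact (bb_flatMap_perm (fun p => (p.1, bbTrim c p.2)) (PySem.List.enumerate lines 0)).symm
  · have h0 : (PySem.List.enumerate lines 0).Pairwise (fun p q => p.1 < q.1) :=
      PySem.List.pairwise_lt_enumerate lines 0
    have h1 := h0.filter (fun p => bbKeys.any (fun k => bbQ k p))
    rw [List.pairwise_map]
    exact h1.imp (fun h => h)

-- ===== VERDICT (by name: the statement is the Claim_ definition above) =====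
theorem backbone_spec : Claim_equal_backbone := by
  intro s c _
  show backbone s c = backbone_alt s c
  unfold backbone backbone_alt
  dsimp only
  -- A side: the canonical-state invariant
  have h0 : (([], (0:Int)) : List (List Char) × Int) = (bbIns3 c [], bbCnt3 []) := by
    simp [bbIns3, bbCnt3]
  rw [h0, aFold_canon]
  -- B side: per-key scans, then sort, then projection
  have hhits : bbKeys.foldl
      (fun (acc : List (Int × List Char)) key =>
        (PySem.List.enumerate (PySem.Chars.splitOn s.toList "\n".toList) 0).foldl
          (fun acc2 p =>
            if PySem.Chars.startswith (PySem.Chars.lstrip p.2) key then acc2 ++ [(p.1, bbTrim c p.2)]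
            else acc2) acc) [] =
      bbKeys.flatMap (fun k =>
        ((PySem.List.enumerate (PySem.Chars.splitOn s.toList "\n".toList) 0).filter
          (fun p => bbQ k p)).map (fun p => (p.1, bbTrim c p.2))) := by
    have hstep : ∀ (acc : List (Int × List Char)) (key : List Char), key ∈ bbKeys →
        (PySem.List.enumerate (PySem.Chars.splitOn s.toList "\n".toList) 0).foldl
          (fun acc2 p =>
            if PySem.Chars.startswith (PySem.Chars.lstrip p.2) key then acc2 ++ [(p.1, bbTrim c p.2)]
            else acc2) acc =
        acc ++ ((PySem.List.enumerate (PySem.Chars.splitOn s.toList "\n".toList) 0).filter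
          (fun p => bbQ key p)).map (fun p => (p.1, bbTrim c p.2)) := by
      intro acc key _
      exact PySem.List.foldl_append_if _ _ _ _
    rw [PySem.List.foldl_congr_mem bbKeys _ _ _ (fun acc key hk => hstep acc key hk)]
    simpa using PySem.List.foldl_append_eq_flatMap
      (fun k => ((PySem.List.enumerate (PySem.Chars.splitOn s.toList "\n".toList) 0).filter
        (fun p => bbQ k p)).map (fun p => (p.1, bbTrim c p.2))) bbKeys ([] : List (Int × List Char))
  rw [hhits, bb_sorted_hits, List.map_map]
  have hproj : ((fun t : Int × List Char => t.2) ∘ fun p : Int × List Char => (p.1, bbTrim c p.2)) =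
      fun p : Int × List Char => bbTrim c p.2 := rfl
  rw [hproj, bb_enum_proj, bbIns3]
  simp
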